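-- pv_equiv track=rewrite | github.com/HI-JIN2/1day-1solved | codingtest/bc3.py | min_chefs_needed
-- ===== SOURCE A (Python) =====
-- def min_chefs_needed(cooking_times, orders):
--     """
--     요리사의 최소 필요 인원을 계산하는 함수
--
--     Args:
--         cooking_times: 각 요리의 조리 시간 배열 (인덱스가 메뉴번호-1)
--         orders: [데드라인, 메뉴번호] 형태의 주문 배열
--
--     Returns:
--         필요한 최소 요리사 수
--     """
--     # 각 주문의 (데드라인, 조리시간, 메뉴번호) 계산
--     tasks = []
--     for deadline, menu_num in orders:
--         cooking_time = cooking_times[menu_num - 1]  # 메뉴번호는 1부터 시작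
--         tasks.append((deadline, cooking_time, menu_num))
--
--     # 데드라인 순으로 정렬 (빠른 데드라인부터 처리)
--     tasks.sort()
--
--     # 각 요리사의 현재 작업 완료 시간을 추적
--     chefs = []
--
--     for deadline, cooking_time, menu_num in tasks:
--         # 이 작업을 할당할 수 있는 요리사 찾기
--         # (현재 시점에서 작업을 시작해도 데드라인에 맞출 수 있는 요리사)
--         best_chef = -1
--         earliest_finish = float('inf')
--
--         for i, chef_busy_until in enumerate(chefs):
--             # 이 요리사가 현재 작업을 끝내고 새 작업을 시작할 수 있는 시간
--             start_time = chef_busy_until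
--             # 새 작업 완료 시간
--             finish_time = start_time + cooking_time
--
--             # 데드라인을 맞출 수 있고, 가장 일찍 끝낼 수 있는 요리사 선택
--             if finish_time <= deadline and finish_time < earliest_finish:
--                 best_chef = i
--                 earliest_finish = finish_time
--
--         if best_chef != -1:
--             # 기존 요리사에게 할당
--             chefs[best_chef] = earliest_finish
--         else:
--             # 새로운 요리사가 필요
--             # 새 요리사는 시간 0부터 시작 가능
--             new_finish_time = cooking_time
--             if new_finish_time <= deadline:
--                 chefs.append(new_finish_time)
--             else:
--                 # 이론적으로 불가능한 경우 (데드라인이 조리시간보다 짧음)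
--                 return -1  # 에러 표시
--
--     return len(chefs)
-- ===== SOURCE B (Python) =====
-- def min_chefs_needed(cooking_times, orders):
--     """Greedy over orders sorted by (deadline, cooking_time, menu): keep the chefs'
--     busy-until times as an ascending list; the only chef worth reusing is the one
--     free earliest (the head), so peek it instead of scanning all chefs, and put the
--     new finish time back with a binary-search insertion."""
--     tasks = sorted((d, cooking_times[m - 1], m) for d, m in orders)
--     busy = []  # chefs' busy-until times, ascending; minimum at the front
--     for deadline, ct, _menu in tasks:
--         if busy and busy[0] + ct <= deadline:
--             finish = busy.pop(0) + ct
--         elif ct <= deadline: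
--             finish = ct          # a brand-new chef starts at time 0
--         else:
--             return -1            # impossible: cooking time exceeds the deadline
--         # binary-search the insertion point that keeps `busy` ascending
--         lo, hi = 0, len(busy)
--         while lo < hi:
--             mid = (lo + hi) // 2
--             if busy[mid] < finish:
--                 lo = mid + 1
--             else:
--                 hi = mid
--         busy.insert(lo, finish)
--     return len(busy)
-- ===== Notes on version B (the rewrite author's own statement) =====
-- stated objective: alternative
-- what changed: A rescans the whole chefs list for every order to find the chef who would finish earliest; B keeps the busy-until times as an ascending list, so that chef is simply the head, and the new finish time is put back by a binary-search insertion instead of an inner scan.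
import Mathlib
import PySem

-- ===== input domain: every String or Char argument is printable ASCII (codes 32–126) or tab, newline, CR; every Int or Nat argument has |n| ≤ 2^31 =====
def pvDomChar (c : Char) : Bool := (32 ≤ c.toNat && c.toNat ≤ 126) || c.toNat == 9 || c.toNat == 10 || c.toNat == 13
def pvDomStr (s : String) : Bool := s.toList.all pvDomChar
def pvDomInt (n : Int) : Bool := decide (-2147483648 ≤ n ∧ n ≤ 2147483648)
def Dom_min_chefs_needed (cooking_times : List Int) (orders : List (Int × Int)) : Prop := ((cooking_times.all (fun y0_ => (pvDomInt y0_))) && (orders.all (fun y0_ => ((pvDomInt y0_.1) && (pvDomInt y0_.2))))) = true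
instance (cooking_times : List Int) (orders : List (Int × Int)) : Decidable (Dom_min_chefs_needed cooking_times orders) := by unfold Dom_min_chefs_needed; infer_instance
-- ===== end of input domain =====

-- B keeps the chefs' busy-until times as an ascending list: the chef worth reusing is
-- always the head, read directly instead of A's inner scan over all chefs, and the new
-- finish time goes back by binary-search insertion (objective: alternative algorithm).

-- ===== PORT A =====
-- Python tuple '<' on (deadline, cooking_time, menu) triples (shared by both ports' sorts)
def pvTupLt (a b : Int × Int × Int) : Bool :=
  a.1 < b.1 || (a.1 == b.1 && (a.2.1 < b.2.1 || (a.2.1 == b.2.1 && a.2.2 < b.2.2)))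

-- the first for-loop of A: tasks.append((deadline, cooking_times[menu-1], menu))
def pvTasksA (cooking_times : List Int) (orders : List (Int × Int)) : List (Int × Int × Int) :=
  orders.foldl (fun tasks p =>
    tasks ++ [(p.1, (PySem.List.pyGet? cooking_times (p.2 - 1)).getD 0, p.2)]) []

-- tasks.sort(): Python's stable sort, modelled exactly as PySem models sorted
-- (PySem.List.sorted_eq_foldl_insertBy) with Python tuple comparison as 'before'
def pvSortA (ts : List (Int × Int × Int)) : List (Int × Int × Int) :=
  ts.foldl (fun acc x => PySem.List.insertBy pvTupLt x acc) []

-- A's inner 'for i, chef_busy_until in enumerate(chefs)' loop; ef = none is float('inf')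
def pvInnerA (ct d : Int) (chefs : List Int) (i : Nat) (best : Int) (ef : Option Int) :
    Int × Option Int :=
  match chefs with
  | [] => (best, ef)
  | c :: cs =>
    let finish := c + ct
    if decide (finish ≤ d) && (match ef with | none => true | some e => decide (finish < e))
    then pvInnerA ct d cs (i+1) (Int.ofNat i) (some finish)
    else pvInnerA ct d cs (i+1) best ef

-- A's outer loop over the sorted tasks
def pvLoopA : List (Int × Int × Int) → List Int → Int
  | [], chefs => (chefs.length : Int)
  | (d, ct, _) :: rest, chefs =>
    let r := pvInnerA ct d chefs 0 (-1) none
    if r.1 ≠ -1 then pvLoopA rest (PySem.List.pySetD chefs r.1 (r.2.getD 0))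
    else if ct ≤ d then pvLoopA rest (chefs ++ [ct])
    else -1

def min_chefs_needed (cooking_times : List Int) (orders : List (Int × Int)) : Int :=
  pvLoopA (pvSortA (pvTasksA cooking_times orders)) []

-- ===== PORT B =====
-- the generator inside sorted(...): one map
def pvTasksB (cooking_times : List Int) (orders : List (Int × Int)) : List (Int × Int × Int) :=
  orders.map (fun p => (p.1, (PySem.List.pyGet? cooking_times (p.2 - 1)).getD 0, p.2))

-- sorted(...): same Python builtin sort as in A (same PySem model)
def pvSortB (ts : List (Int × Int × Int)) : List (Int × Int × Int) :=
  ts.foldl (fun acc x => PySem.List.insertBy pvTupLt x acc) []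

-- B's hand-written binary search: while lo < hi: mid = (lo+hi)//2; ...
def pvBisect (busy : List Int) (x : Int) (lo hi : Nat) : Nat :=
  if h : lo < hi then
    let mid := (lo + hi) / 2
    if busy.getD mid 0 < x then pvBisect busy x (mid + 1) hi
    else pvBisect busy x lo mid
  else lo
termination_by hi - lo
decreasing_by all_goals omega

-- B's loop: peek/pop the head (earliest-free chef), binary-insert the new finish
def pvLoopB : List (Int × Int × Int) → List Int → Int
  | [], busy => (busy.length : Int)
  | (d, ct, _) :: rest, busy =>
    match busy with
    | b0 :: bs =>
      if b0 + ct ≤ d then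
        let f := b0 + ct
        pvLoopB rest (bs.insertIdx (pvBisect bs f 0 bs.length) f)
      else if ct ≤ d then
        pvLoopB rest ((b0 :: bs).insertIdx (pvBisect (b0 :: bs) ct 0 (b0 :: bs).length) ct)
      else -1
    | [] =>
      if ct ≤ d then pvLoopB rest (([] : List Int).insertIdx (pvBisect [] ct 0 0) ct)
      else -1

def min_chefs_needed_alt (cooking_times : List Int) (orders : List (Int × Int)) : Int :=
  pvLoopB (pvSortB (pvTasksB cooking_times orders)) []

-- ===== PRECONDITION & SPEC =====
-- Pre_ excludes exactly the inputs where Python A raises IndexError: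
-- some order's menu number m has m-1 outside the (negative-index) range of cooking_times.
def Pre_min_chefs_needed (cooking_times : List Int) (orders : List (Int × Int)) : Prop :=
  ∀ p ∈ orders, PySem.Raise.InRange cooking_times.length (p.2 - 1)
instance (cooking_times : List Int) (orders : List (Int × Int)) : Decidable (Pre_min_chefs_needed cooking_times orders) := by unfold Pre_min_chefs_needed; infer_instance

def pvWitness_min_chefs_needed : List Int × (List (Int × Int)) := ([3, 2], [(5, 1), (4, 2)])

def Spec_min_chefs_needed (cooking_times : List Int) (orders : List (Int × Int)) (out : Int) : Prop := out = min_chefs_needed_alt cooking_times orders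
instance (cooking_times : List Int) (orders : List (Int × Int)) (out : Int) : Decidable (Spec_min_chefs_needed cooking_times orders out) := by unfold Spec_min_chefs_needed; infer_instance

-- ===== CLAIM (what is proved, stated in full; the proofs are below) =====
def Claim_equal_min_chefs_needed : Prop := ∀ (cooking_times : List Int) (orders : List (Int × Int)), Dom_min_chefs_needed cooking_times orders → Pre_min_chefs_needed cooking_times orders → Spec_min_chefs_needed cooking_times orders (min_chefs_needed cooking_times orders)

-- ===== LEMMAS AND PROOFS =====

lemma pvTasks_eq (cooking_times : List Int) (orders : List (Int × Int)) :
    pvTasksA cooking_times orders = pvTasksB cooking_times orders := by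
  unfold pvTasksA pvTasksB
  simpa using PySem.List.foldl_append_singleton_eq_map (fun p : Int × Int => (p.1, (PySem.List.pyGet? cooking_times (p.2 - 1)).getD 0, p.2)) orders []

-- binary-search invariant: the result keeps the "< x before, ≥ x after" bracketing
lemma pvBisect_spec (l : List Int) (x : Int) :
    ∀ n lo hi, hi - lo ≤ n → lo ≤ hi → hi ≤ l.length →
    (∀ j (hj : j < l.length), j < lo → l[j] < x) →
    (∀ j (hj : j < l.length), hi ≤ j → x ≤ l[j]) →
    l.Pairwise (· ≤ ·) →
    pvBisect l x lo hi ≤ l.length ∧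
      (∀ j (hj : j < l.length), j < pvBisect l x lo hi → l[j] < x) ∧
      (∀ j (hj : j < l.length), pvBisect l x lo hi ≤ j → x ≤ l[j]) := by
  intro n
  induction n with
  | zero =>
    intro lo hi hn hlh hhl h1 h2 _
    rw [pvBisect, dif_neg (by omega)]
    exact ⟨by omega, fun j hj hjlo => h1 j hj hjlo, fun j hj hloj => h2 j hj (by omega)⟩
  | succ n ih =>
    intro lo hi hn hlh hhl h1 h2 hp
    have hmono : ∀ (i j : Nat) (hi : i < l.length) (hj : j < l.length), i ≤ j → l[i] ≤ l[j] := by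
      intro i j hi hj hij
      rcases Nat.lt_or_ge i j with h | h
      · exact List.pairwise_iff_getElem.mp hp i j hi hj h
      · have : i = j := by omega
        subst this; exact le_refl _
    by_cases hlt : lo < hi
    · rw [pvBisect, dif_pos hlt]
      have hmlen : (lo + hi) / 2 < l.length := by omega
      simp only [List.getD_eq_getElem l 0 hmlen]
      by_cases hcmp : l[(lo + hi) / 2] < x
      · rw [if_pos hcmp]
        refine ih ((lo + hi) / 2 + 1) hi (by omega) (by omega) hhl ?_ h2 hp
        intro j hj hjlt
        rcases Nat.lt_or_ge j lo with h | h
        · exact h1 j hj h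
        · exact lt_of_le_of_lt (hmono j ((lo + hi) / 2) hj hmlen (by omega)) hcmp
      · rw [if_neg hcmp]
        refine ih lo ((lo + hi) / 2) (by omega) (by omega) (by omega) h1 ?_ hp
        intro j hj hmj
        exact le_trans (not_lt.mp hcmp) (hmono _ j hmlen hj hmj)
    · rw [pvBisect, dif_neg hlt]
      exact ⟨by omega, fun j hj hjlo => h1 j hj hjlo, fun j hj hloj => h2 j hj (by omega)⟩

lemma insertIdx_eq_orderedInsert (x : Int) :
    ∀ (l : List Int) (r : Nat), r ≤ l.length →
    (∀ j (hj : j < l.length), j < r → l[j] < x) →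
    (∀ j (hj : j < l.length), r ≤ j → x ≤ l[j]) →
    l.insertIdx r x = List.orderedInsert (· ≤ ·) x l := by
  intro l
  induction l with
  | nil =>
    intro r hr _ _
    obtain rfl : r = 0 := by simpa using hr
    rfl
  | cons a t ih =>
    intro r hr h1 h2
    cases r with
    | zero =>
      have hxa : x ≤ a := h2 0 (by simp) (by omega)
      simp [List.orderedInsert, hxa]
    | succ s =>
      have hax : a < x := h1 0 (by simp) (by omega)
      rw [List.insertIdx_succ_cons]
      rw [List.orderedInsert, if_neg (by omega)]
      rw [ih s (by simpa using hr)
        (fun j hj hjs => by simpa using h1 (j+1) (by simpa using hj) (by omega))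
        (fun j hj hsj => by simpa using h2 (j+1) (by simpa using hj) (by omega))]

lemma pvBisect_insert (l : List Int) (x : Int) (hs : l.Pairwise (· ≤ ·)) :
    l.insertIdx (pvBisect l x 0 l.length) x = List.orderedInsert (· ≤ ·) x l := by
  obtain ⟨hle, h1, h2⟩ := pvBisect_spec l x l.length 0 l.length (by omega) (by omega) (le_refl _)
    (fun j hj hj0 => by omega) (fun j hj hlj => by omega) hs
  exact insertIdx_eq_orderedInsert x l _ hle h1 h2

-- inner loop of A: no chef can meet the deadline → state unchanged
lemma pvInnerA_none (ct d : Int) :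
    ∀ (chefs : List Int) (i : Nat) (b : Int), (∀ c ∈ chefs, ¬ (c + ct ≤ d)) →
    pvInnerA ct d chefs i b none = (b, none) := by
  intro chefs
  induction chefs with
  | nil => intro i b _; rfl
  | cons c cs ih =>
    intro i b h
    have hc : ¬ (c + ct ≤ d) := h c (by simp)
    simp only [pvInnerA]
    rw [if_neg (by simp [hc])]
    exact ih _ b (fun x hx => h x (by simp [hx]))

-- inner loop of A, current best e: no strictly better finish in chefs → unchanged
lemma pvInnerA_keep (ct d : Int) :
    ∀ (chefs : List Int) (i : Nat) (b e : Int), (∀ c ∈ chefs, e ≤ c + ct) →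
    pvInnerA ct d chefs i b (some e) = (b, some e) := by
  intro chefs
  induction chefs with
  | nil => intro i b e _; rfl
  | cons c cs ih =>
    intro i b e h
    have hc : ¬ (c + ct < e) := not_lt.mpr (h c (by simp))
    simp only [pvInnerA]
    rw [if_neg (by simp [hc])]
    exact ih _ b e (fun x hx => h x (by simp [hx]))

-- inner loop of A, current best e, and the minimum m of chefs improves on it
lemma pvInnerA_improve (ct d : Int) :
    ∀ (chefs : List Int) (m : Int) (i : Nat) (b e : Int),
    m ∈ chefs → (∀ c ∈ chefs, m ≤ c) → m + ct < e → e ≤ d →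
    ∃ j : Nat, j < chefs.length ∧ chefs[j]? = some m ∧
      pvInnerA ct d chefs i b (some e) = ((((i + j : Nat)) : Int), some (m + ct)) := by
  intro chefs
  induction chefs with
  | nil => intro m i b e hm; exact absurd hm (by simp)
  | cons c cs ih =>
    intro m i b e hm hmin hlt hed
    have hmc : m ≤ c := hmin c (by simp)
    by_cases hcs : ∀ c' ∈ cs, c ≤ c'
    · -- the head is a minimum: c = m
      have hcm : c = m := by
        rcases List.mem_cons.mp hm with h | h
        · exact h.symm
        · exact le_antisymm (hcs m h) hmc
      refine ⟨0, by simp, by simp [hcm], ?_⟩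
      have hcond : c + ct < e := hcm ▸ hlt
      simp only [pvInnerA]
      rw [if_pos ((Bool.and_eq_true _ _).mpr ⟨decide_eq_true (show c + ct ≤ d by omega), decide_eq_true hcond⟩)]
      rw [pvInnerA_keep ct d cs (i+1) (Int.ofNat i) (c + ct)
        (fun x hx => by have := hcs x hx; omega)]
      simp [hcm]
    · -- the minimum lies strictly below the head, inside cs
      push Not at hcs
      obtain ⟨c', hc', hc'lt⟩ := hcs
      have hmcs : m ∈ cs := by
        rcases List.mem_cons.mp hm with h | h
        · exact absurd (hmin c' (by simp [hc'])) (by omega)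
        · exact h
      have hmlt : m < c := lt_of_le_of_lt (hmin c' (by simp [hc'])) hc'lt
      by_cases hhd : c + ct < e
      · -- head updates the state, then cs improves on c + ct
        obtain ⟨j, hj, hjm, hrec⟩ := ih m (i+1) (Int.ofNat i) (c + ct) hmcs
          (fun x hx => hmin x (by simp [hx])) (by omega) (le_of_lt (lt_of_lt_of_le hhd hed))
        refine ⟨j + 1, by simpa using hj, by simpa using hjm, ?_⟩
        simp only [pvInnerA]
        rw [if_pos ((Bool.and_eq_true _ _).mpr ⟨decide_eq_true (show c + ct ≤ d by omega), decide_eq_true hhd⟩)]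
        rw [hrec]
        congr 1
        omega
      · -- head does not update; recurse with the same state
        obtain ⟨j, hj, hjm, hrec⟩ := ih m (i+1) b e hmcs
          (fun x hx => hmin x (by simp [hx])) hlt hed
        refine ⟨j + 1, by simpa using hj, by simpa using hjm, ?_⟩
        simp only [pvInnerA]
        rw [if_neg (by simp [hhd])]
        rw [hrec]
        congr 1
        omega

-- inner loop of A from the initial state: it finds the minimum m (some occurrence j)
lemma pvInnerA_found (ct d : Int) :
    ∀ (chefs : List Int) (m : Int) (i : Nat),
    m ∈ chefs → (∀ c ∈ chefs, m ≤ c) → m + ct ≤ d →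
    ∃ j : Nat, j < chefs.length ∧ chefs[j]? = some m ∧
      pvInnerA ct d chefs i (-1) none = ((((i + j : Nat)) : Int), some (m + ct)) := by
  intro chefs
  induction chefs with
  | nil => intro m i hm; exact absurd hm (by simp)
  | cons c cs ih =>
    intro m i hm hmin hed
    have hmc : m ≤ c := hmin c (by simp)
    by_cases hhd : c + ct ≤ d
    · -- head becomes the first candidate
      by_cases hcs : ∀ c' ∈ cs, c ≤ c'
      · have hcm : c = m := by
          rcases List.mem_cons.mp hm with h | h
          · exact h.symm
          · exact le_antisymm (hcs m h) hmc
        refine ⟨0, by simp, by simp [hcm], ?_⟩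
        simp only [pvInnerA]
        rw [if_pos (by simp [hhd])]
        rw [pvInnerA_keep ct d cs (i+1) (Int.ofNat i) (c + ct)
          (fun x hx => by have := hcs x hx; omega)]
        simp [hcm]
      · push Not at hcs
        obtain ⟨c', hc', hc'lt⟩ := hcs
        have hmcs : m ∈ cs := by
          rcases List.mem_cons.mp hm with h | h
          · exact absurd (hmin c' (by simp [hc'])) (by omega)
          · exact h
        have hmlt : m < c := lt_of_le_of_lt (hmin c' (by simp [hc'])) hc'lt
        obtain ⟨j, hj, hjm, hrec⟩ := pvInnerA_improve ct d cs m (i+1) (Int.ofNat i) (c + ct)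
          hmcs (fun x hx => hmin x (by simp [hx])) (by omega) hhd
        refine ⟨j + 1, by simpa using hj, by simpa using hjm, ?_⟩
        simp only [pvInnerA]
        rw [if_pos (by simp [hhd])]
        rw [hrec]
        congr 1
        omega
    · -- head infeasible; the minimum is in cs
      have hmcs : m ∈ cs := by
        rcases List.mem_cons.mp hm with h | h
        · exact absurd hed (by omega)
        · exact h
      obtain ⟨j, hj, hjm, hrec⟩ := ih m (i+1) hmcs (fun x hx => hmin x (by simp [hx])) hed
      refine ⟨j + 1, by simpa using hj, by simpa using hjm, ?_⟩
      simp only [pvInnerA]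
      rw [if_neg (by simp [hhd])]
      rw [hrec]
      congr 1
      omega

-- writing the new finish over the chosen chef = dropping that chef and adding the finish
lemma set_perm (l : List Int) (j : Nat) (m v : Int) (hj : l[j]? = some m) :
    ∀ hs : List Int, l.Perm (m :: hs) → (l.set j v).Perm (v :: hs) := by
  intro hs hperm
  have hjl : j < l.length := by
    by_contra hc
    simp [List.getElem?_eq_none (Nat.le_of_not_lt hc)] at hj
  have hm : l[j] = m := (List.getElem?_eq_some_iff.mp hj).choose_spec
  have h1 : (l.set j v).Perm (v :: l.eraseIdx j) := List.set_perm_cons_eraseIdx hjl v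
  have h2 : l.Perm (m :: l.eraseIdx j) := by
    simpa [hm] using (List.getElem_cons_eraseIdx_perm hjl).symm
  have h3 : (l.eraseIdx j).Perm hs := (h2.symm.trans hperm).cons_inv
  exact h1.trans (h3.cons v)

-- the loops agree whenever A's chefs list is a permutation of B's ascending busy list
lemma pvLoop_eq :
    ∀ (tasks : List (Int × Int × Int)) (chefs heap : List Int),
    chefs.Perm heap → heap.Pairwise (· ≤ ·) →
    pvLoopA tasks chefs = pvLoopB tasks heap := by
  intro tasks
  induction tasks with
  | nil =>
    intro chefs heap hperm _
    simp [pvLoopA, pvLoopB, hperm.length_eq]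
  | cons task rest ih =>
    obtain ⟨d, ct, mn⟩ := task
    intro chefs heap hperm hsorted
    cases heap with
    | nil =>
      obtain rfl : chefs = [] := hperm.eq_nil
      simp only [pvLoopA, pvLoopB]
      have hinner : pvInnerA ct d [] 0 (-1) none = (-1, none) := rfl
      rw [hinner]
      rw [if_neg (by simp)]
      by_cases hctd : ct ≤ d
      · rw [if_pos hctd, if_pos hctd]
        have h0 : pvBisect ([] : List Int) ct 0 0 = 0 := by rw [pvBisect]; simp
        rw [h0]
        exact ih [ct] [ct] (List.Perm.refl _) (by simp)
      · rw [if_neg hctd, if_neg hctd]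
    | cons m hs =>
      have hhead := List.pairwise_cons.mp hsorted
      have hm_mem : m ∈ chefs := hperm.mem_iff.mpr (by simp)
      have hmmin : ∀ c ∈ chefs, m ≤ c := by
        intro c hc
        rcases List.mem_cons.mp (hperm.mem_iff.mp hc) with h | h
        · omega
        · exact hhead.1 c h
      by_cases hfeas : m + ct ≤ d
      · -- A reuses the earliest-free chef; B pops the head
        obtain ⟨j, hj, hjm, hinner⟩ := pvInnerA_found ct d chefs m 0 hm_mem hmmin hfeas
        simp only [pvLoopA, pvLoopB, hinner]
        rw [if_pos (by omega)]
        rw [if_pos hfeas]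
        have hset : PySem.List.pySetD chefs (((0 + j : Nat) : Int)) ((some (m + ct)).getD 0)
            = chefs.set j (m + ct) := by
          simp only [Option.getD_some, Nat.zero_add]
          rw [PySem.List.pySetD, PySem.List.pySet?_natCast chefs j (m + ct) hj]
          rfl
        rw [hset]
        have hsort_hs : hs.Pairwise (· ≤ ·) := hhead.2
        rw [pvBisect_insert hs (m + ct) hsort_hs]
        refine ih _ _ ?_ ?_
        · exact (set_perm chefs j m (m + ct) hjm hs hperm).trans
            (List.perm_orderedInsert _ (m + ct) hs).symm
        · exact List.Pairwise.orderedInsert (m + ct) hs hsort_hs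
      · -- no existing chef can meet the deadline
        have hinner := pvInnerA_none ct d chefs 0 (-1)
          (fun c hc => by have := hmmin c hc; omega)
        simp only [pvLoopA, pvLoopB, hinner]
        rw [if_neg (by simp)]
        rw [if_neg hfeas]
        by_cases hctd : ct ≤ d
        · rw [if_pos hctd, if_pos hctd]
          rw [pvBisect_insert (m :: hs) ct hsorted]
          refine ih _ _ ?_ ?_
          · exact ((List.perm_append_singleton ct chefs).trans
              ((hperm).cons ct)).trans (List.perm_orderedInsert _ ct (m :: hs)).symm
          · exact List.Pairwise.orderedInsert ct (m :: hs) hsorted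
        · rw [if_neg hctd, if_neg hctd]

-- ===== VERDICT (by name: the statement is the Claim_ definition above) =====
theorem min_chefs_needed_spec : Claim_equal_min_chefs_needed := by
  intro cooking_times orders _ _
  unfold Spec_min_chefs_needed min_chefs_needed min_chefs_needed_alt
  rw [pvTasks_eq]
  show pvLoopA (pvSortA _) [] = pvLoopB (pvSortB _) []
  have hs : pvSortA (pvTasksB cooking_times orders) = pvSortB (pvTasksB cooking_times orders) := rfl
  rw [hs]
  exact pvLoop_eq _ [] [] (List.Perm.refl _) (List.Pairwise.nil)
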